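-- pv_equiv track=rewrite | github.com/tashakim/puzzles_python | mutate_arr.py | mutateTheArray
-- ===== SOURCE A (Python) =====
-- def mutateTheArray(n, a):
--
--     b = [0]*n
--     if n == 1:
--         return [a[0]]
--     b[0] = a[0] + a[1]
--     b[-1] = a[-1] + a[-2]
--
--     for i in range(1, n-1):
--         b[i] = a[i-1] + a[i] + a[i+1]
--
--     return b
-- ===== SOURCE B (Python) =====
-- def mutateTheArray(n, a):
--     if n == 1:
--         return [a[0]]
--     p = [0]
--     for x in a:
--         p.append(p[-1] + x)
--     interior = [p[i + 2] - p[i - 1] for i in range(1, n - 1)]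
--     return [a[0] + a[1]] + interior + [a[-1] + a[-2]]
-- ===== Notes on version B (the rewrite author's own statement) =====
-- stated objective: alternative
-- what changed: Instead of preallocating [0]*n and mutating it at the two edges and in an index loop, B builds a prefix-sum table once and assembles the result by concatenation, computing each interior entry as a difference of two prefix sums.
import Mathlib
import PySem

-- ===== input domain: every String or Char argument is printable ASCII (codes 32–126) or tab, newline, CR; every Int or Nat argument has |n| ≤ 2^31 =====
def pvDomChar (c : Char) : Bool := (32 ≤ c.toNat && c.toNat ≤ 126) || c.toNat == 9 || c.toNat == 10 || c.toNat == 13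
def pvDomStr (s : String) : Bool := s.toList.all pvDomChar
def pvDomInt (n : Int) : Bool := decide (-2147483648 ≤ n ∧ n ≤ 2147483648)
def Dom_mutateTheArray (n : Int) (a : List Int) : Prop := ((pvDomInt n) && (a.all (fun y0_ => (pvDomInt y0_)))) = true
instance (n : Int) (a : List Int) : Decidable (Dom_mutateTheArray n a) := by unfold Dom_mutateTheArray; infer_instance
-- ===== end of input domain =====

-- B keeps A's edge formulas but computes the interior entries from a prefix-sum table and
-- assembles the result by concatenation instead of mutating a preallocated array (same O(n) cost).


-- ===== PORT A =====
-- Literal transliteration of A; the .getD 0 defaults stand where Python would raise IndexError,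
-- which Pre_ excludes.
def mutateTheArray (n : Int) (a : List Int) : List Int :=
  let b := PySem.List.pyRepeat [(0 : Int)] n            -- b = [0]*n
  if n = 1 then
    [(PySem.List.pyGet? a 0).getD 0]                    -- return [a[0]]
  else
    let b := PySem.List.pySetD b 0
      ((PySem.List.pyGet? a 0).getD 0 + (PySem.List.pyGet? a 1).getD 0)          -- b[0] = a[0]+a[1]
    let b := PySem.List.pySetD b (-1)
      ((PySem.List.pyGet? a (-1)).getD 0 + (PySem.List.pyGet? a (-2)).getD 0)    -- b[-1] = a[-1]+a[-2]
    (PySem.List.pyRange 1 (n - 1) 1).foldl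
      (fun b i =>
        PySem.List.pySetD b i
          ((PySem.List.pyGet? a (i - 1)).getD 0 + (PySem.List.pyGet? a i).getD 0 +
            (PySem.List.pyGet? a (i + 1)).getD 0)) b    -- for i in range(1, n-1): b[i] = …

-- ===== PORT B =====
-- Literal transliteration of Source B: prefix-sum table p, interior entries as prefix differences,
-- result assembled by concatenation.
def mutateTheArray_alt (n : Int) (a : List Int) : List Int :=
  if n = 1 then
    [(PySem.List.pyGet? a 0).getD 0]
  else
    let p := a.foldl (fun p x => p ++ [(PySem.List.pyGet? p (-1)).getD 0 + x]) [(0 : Int)]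
    let interior := (PySem.List.pyRange 1 (n - 1) 1).map (fun i =>
      (PySem.List.pyGet? p (i + 2)).getD 0 - (PySem.List.pyGet? p (i - 1)).getD 0)
    [(PySem.List.pyGet? a 0).getD 0 + (PySem.List.pyGet? a 1).getD 0] ++ interior ++
      [(PySem.List.pyGet? a (-1)).getD 0 + (PySem.List.pyGet? a (-2)).getD 0]

-- ===== PRECONDITION & SPEC =====
-- Pre_ is exactly the set of inputs on which A returns normally: n == 1 with a nonempty, or
-- 2 <= n <= len(a); everywhere else A raises IndexError.
def Pre_mutateTheArray (n : Int) (a : List Int) : Prop :=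
  (n = 1 ∧ a ≠ []) ∨ (2 ≤ n ∧ n ≤ (a.length : Int))
instance (n : Int) (a : List Int) : Decidable (Pre_mutateTheArray n a) := by
  unfold Pre_mutateTheArray; infer_instance
def pvWitness_mutateTheArray : Int × List Int := (3, [1, 2, 3])

def Spec_mutateTheArray (n : Int) (a : List Int) (out : List Int) : Prop := out = mutateTheArray_alt n a
instance (n : Int) (a : List Int) (out : List Int) : Decidable (Spec_mutateTheArray n a out) := by unfold Spec_mutateTheArray; infer_instance

-- ===== CLAIM (what is proved, stated in full; the proofs are below) =====
def Claim_equal_mutateTheArray : Prop := ∀ (n : Int) (a : List Int), Dom_mutateTheArray n a → Pre_mutateTheArray n a → Spec_mutateTheArray n a (mutateTheArray n a)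

-- ===== LEMMAS AND PROOFS =====

theorem pv_pySetD_neg_one (xs : List Int) (v : Int) (h : xs ≠ []) :
    PySem.List.pySetD xs (-1) v = xs.set (xs.length - 1) v := by
  have hl : 0 < xs.length := List.length_pos_iff.mpr h
  simp only [PySem.List.pySetD, PySem.List.pySet?, PySem.List.pyIdx?]
  rw [if_neg (by omega), if_pos (by omega)]
  norm_num

theorem pv_prefix_build (a : List Int) :
    ∀ (acc : List Int) (s : Int), acc.getLast? = some s →
    a.foldl (fun p x => p ++ [p.getLast?.getD 0 + x]) acc
      = acc ++ (List.range a.length).map (fun k => s + (a.take (k + 1)).sum) := by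
  induction a with
  | nil => simp
  | cons x t ih =>
    intro acc s hs
    simp only [List.foldl_cons, hs, Option.getD_some]
    rw [ih (acc ++ [s + x]) (s + x) (by simp)]
    rw [List.append_assoc]
    congr 1
    simp only [List.length_cons, List.range_succ_eq_map, List.map_cons, List.map_map,
      List.take_succ_cons, List.sum_cons, List.take_zero, List.sum_nil, add_zero,
      List.singleton_append, Function.comp_def]
    congr 1
    apply List.map_congr_left
    intro k _
    ring

theorem pv_p_eq (a : List Int) :
    a.foldl (fun p x => p ++ [p.getLast?.getD 0 + x]) [(0 : Int)]
      = (List.range (a.length + 1)).map (fun k => (a.take k).sum) := by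
  rw [pv_prefix_build a [0] 0 rfl, List.range_succ_eq_map]
  simp [List.map_map, Function.comp_def]

theorem pv_pget (a : List Int) (j : Nat) (hj : j ≤ a.length) :
    ((List.range (a.length + 1)).map (fun k => (a.take k).sum))[j]? = some ((a.take j).sum) := by
  rw [List.getElem?_map, List.getElem?_range (by omega)]
  rfl

theorem pv_foldl_set_length (w : Int → Int) (l : List Int) (b : List Int) :
    (l.foldl (fun b i => PySem.List.pySetD b i (w i)) b).length = b.length := by
  induction l generalizing b with
  | nil => rfl
  | cons i t ih => simp [List.foldl_cons, ih, PySem.List.length_pySetD]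

theorem pv_foldl_set_getElem? (w : Int → Int) :
    ∀ (l : List Int), (∀ i ∈ l, 0 ≤ i) → l.Nodup →
    ∀ (b : List Int) (k : Nat), k < b.length →
    (l.foldl (fun b i => PySem.List.pySetD b i (w i)) b)[k]? =
      if (k : Int) ∈ l then some (w (k : Int)) else b[k]? := by
  intro l
  induction l with
  | nil => simp
  | cons i t ih =>
    intro hnn hnd b k hk
    have hi0 : 0 ≤ i := hnn i (by simp)
    simp only [List.foldl_cons]
    rw [ih (fun j hj => hnn j (by simp [hj])) hnd.of_cons _ _
        (by rw [PySem.List.length_pySetD]; exact hk)]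
    by_cases hmem : (k : Int) ∈ t
    · rw [if_pos hmem, if_pos (by simp [hmem])]
    · rw [if_neg hmem, PySem.List.pySetD_of_nonneg _ _ hi0, List.getElem?_set]
      by_cases hik : i.toNat = k
      · have hi : i = (k : Int) := by omega
        rw [if_pos hik, if_pos (by omega), if_pos (by simp [hi]), hi]
      · have hi : ¬ ((k : Int) = i) := by omega
        rw [if_neg hik, if_neg (by simp [hmem, hi])]

theorem pv_sum_take_getD (a : List Int) (m : Nat) (h : m < a.length) :
    (a.take (m + 1)).sum = (a.take m).sum + (a[m]?).getD 0 := by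
  rw [List.sum_take_succ _ _ h, List.getElem?_eq_getElem h]
  rfl

theorem pv_win3 (a : List Int) (k : Nat) (h1 : 1 ≤ k) (h2 : k + 1 < a.length) :
    (a.take (k + 2)).sum - (a.take (k - 1)).sum =
      (a[k - 1]?).getD 0 + (a[k]?).getD 0 + (a[k + 1]?).getD 0 := by
  have e5 : (a.take (k - 1 + 1)).sum = (a.take (k - 1)).sum + (a[k - 1]?).getD 0 :=
    pv_sum_take_getD _ _ (by omega)
  have e4 : (a.take (k + 1)).sum = (a.take k).sum + (a[k]?).getD 0 :=
    pv_sum_take_getD _ _ (by omega)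
  have e3 : (a.take (k + 1 + 1)).sum = (a.take (k + 1)).sum + (a[k + 1]?).getD 0 :=
    pv_sum_take_getD _ _ (by omega)
  rw [show k - 1 + 1 = k by omega] at e5
  rw [show k + 1 + 1 = k + 2 by omega] at e3
  linarith

theorem pv_case_ge2 (a : List Int) (n : Int) (h2 : 2 ≤ n) (hnL : n ≤ (a.length : Int)) :
    mutateTheArray n a = mutateTheArray_alt n a := by
  have hN2 : 2 ≤ n.toNat := by omega
  have hNL : n.toNat ≤ a.length := by omega
  apply List.ext_getElem?
  intro k
  simp only [mutateTheArray, mutateTheArray_alt]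
  rw [if_neg (by omega), if_neg (by omega)]
  rw [PySem.List.pyRepeat_singleton, PySem.List.pySetD_of_nonneg _ _ (le_refl 0)]
  simp only [Int.toNat_zero]
  rw [pv_pySetD_neg_one _ _ (by
    apply List.length_pos_iff.mp
    simp only [List.length_set, List.length_replicate]
    omega)]
  simp only [List.length_set, List.length_replicate]
  simp only [PySem.List.pyGet?_neg_one]
  rw [pv_p_eq]
  by_cases hk : k < n.toNat
  · rw [pv_foldl_set_getElem? _ _
      (fun i hi => by rw [PySem.List.mem_pyRange_one] at hi; omega)
      (by rw [PySem.List.pyRange_one]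
          exact List.nodup_range.map (fun x y hxy => by simpa using hxy))
      _ k (by simp; omega)]
    simp only [PySem.List.mem_pyRange_one]
    cases k with
    | zero =>
      rw [if_neg (by omega), List.getElem?_set, List.getElem?_set,
          if_neg (by omega), if_pos rfl, if_pos (by simp only [List.length_replicate]; omega)]
      simp
    | succ j =>
      simp only [List.singleton_append]
      by_cases hj : j < (n - 2).toNat
      · -- interior entry
        rw [if_pos (by omega)]
        rw [List.getElem?_append_left (by
          simp only [List.length_cons, List.length_map, PySem.List.pyRange_one, List.length_range]
          omega)]
        rw [List.getElem?_cons_succ]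
        rw [List.getElem?_map, PySem.List.pyRange_one, List.getElem?_map,
            List.getElem?_range (by omega)]
        simp only [Option.map_some]
        rw [show (1 : Int) + (j : Int) = ((j + 1 : Nat) : Int) by omega]
        rw [show ((j + 1 : Nat) : Int) - 1 = ((j : Nat) : Int) by omega,
            show ((j + 1 : Nat) : Int) + 1 = ((j + 2 : Nat) : Int) by omega,
            show ((j + 1 : Nat) : Int) + 2 = ((j + 3 : Nat) : Int) by omega,
            PySem.List.pyGet?_natCast, PySem.List.pyGet?_natCast, PySem.List.pyGet?_natCast,
            PySem.List.pyGet?_natCast, PySem.List.pyGet?_natCast,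
            pv_pget _ _ (by omega), pv_pget _ _ (by omega)]
        simp only [Option.getD_some, Option.some.injEq]
        have := pv_win3 a (j + 1) (by omega) (by omega)
        rw [show j + 1 + 2 = j + 3 by omega, show j + 1 - 1 = j by omega,
            show j + 1 + 1 = j + 2 by omega] at this
        rw [this]
      · -- last entry
        have hj1 : j = (n - 2).toNat := by omega
        rw [if_neg (by omega), List.getElem?_set, if_pos (by omega),
            if_pos (by simp only [List.length_set, List.length_replicate]; omega)]
        rw [List.getElem?_append_right (by
          simp only [List.length_cons, List.length_map, PySem.List.pyRange_one, List.length_range]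
          omega)]
        simp only [List.length_cons, List.length_map, PySem.List.pyRange_one, List.length_range]
        rw [show j + 1 - ((n - 1 - 1).toNat + 1) = 0 by omega, List.getElem?_cons_zero]
  · rw [List.getElem?_eq_none, List.getElem?_eq_none]
    · simp only [List.length_append, List.length_cons, List.length_map, PySem.List.pyRange_one,
        List.length_range, List.length_nil]
      omega
    · rw [pv_foldl_set_length]
      simp only [List.length_set, List.length_replicate]
      omega

theorem pv_main :
    ∀ (n : Int) (a : List Int), Pre_mutateTheArray n a →
      mutateTheArray n a = mutateTheArray_alt n a := by
  intro n a hp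
  rcases hp with ⟨hn, _⟩ | ⟨h2, hnL⟩
  · subst hn
    simp [mutateTheArray, mutateTheArray_alt]
  · exact pv_case_ge2 a n h2 hnL

-- ===== VERDICT (by name: the statement is the Claim_ definition above) =====
theorem mutateTheArray_spec : Claim_equal_mutateTheArray := by
  intro n a _ hp
  unfold Spec_mutateTheArray
  exact pv_main n a hp
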